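-- pv_equiv track=rewrite | github.com/goshipra/Algorithms | commaoncodingquestions/stringquestions.py | compresstodigit
-- ===== SOURCE A (Python) =====
-- def compresstodigit(astring):
--     dict = {}
--     for element in astring:
--         if element in dict:
--             dict[element] = dict[element] + 1
--         else:
--             dict[element] = 1
--
--     newstring = ''
--     for element in dict:
--         newstring = newstring + element +str(dict[element])
--
--     return newstring
-- ===== SOURCE B (Python) =====
-- def compresstodigit(astring):
--     seen = set()
--     newstring = ''
--     for char in astring:
--         if char not in seen:
--             seen.add(char)
--             newstring += char + str(astring.count(char))
--     return newstring
-- ===== Notes on version B (the rewrite author's own statement) =====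
-- stated objective: simpler
-- what changed: Replaces the two-phase shape (build a frequency dict, then a second loop over the dict emitting char+count) with a single loop over the string that emits char+astring.count(char) at each first occurrence, tracked by a seen-set; no table is built or re-read.
import Mathlib
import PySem

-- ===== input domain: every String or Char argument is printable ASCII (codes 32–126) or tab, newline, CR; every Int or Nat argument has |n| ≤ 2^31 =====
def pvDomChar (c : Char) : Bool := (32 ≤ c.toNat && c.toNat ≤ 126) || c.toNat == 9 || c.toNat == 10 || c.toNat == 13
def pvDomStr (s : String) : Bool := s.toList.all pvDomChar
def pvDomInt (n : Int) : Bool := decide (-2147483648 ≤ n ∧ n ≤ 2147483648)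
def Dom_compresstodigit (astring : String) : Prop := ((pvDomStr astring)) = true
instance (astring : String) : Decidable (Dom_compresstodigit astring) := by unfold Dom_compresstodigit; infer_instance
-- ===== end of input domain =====

-- B replaces A's two-phase build-a-frequency-dict-then-emit with a single seen-set pass that
-- emits char + str(astring.count(char)) at each first occurrence (objective: simpler).

-- ===== PORT A =====
-- A: build a counting dict over the string, then emit key + str(count) in insertion order.
-- dict[element] is rendered as getD _ 0: it is only read at keys that are present,
-- where Python's dict[k] and getD k 0 coincide.
def compresstodigit (astring : String) : String :=
  let d : PySem.Dict Char Int :=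
    astring.toList.foldl
      (fun d element =>
        if d.contains element then d.insert element (d.getD element 0 + 1)
        else d.insert element 1)
      PySem.Dict.empty
  (PySem.Dict.keys d).foldl
    (fun newstring element => newstring ++ element.toString ++ PySem.Int.toStr (d.getD element 0))
    ""

-- ===== PORT B =====
def compresstodigit_alt (astring : String) : String :=
  let r : PySem.Set Char × String :=
    astring.toList.foldl
      (fun p char =>
        if PySem.Set.contains p.1 char then p
        else (PySem.Set.add p.1 char,
              p.2 ++ char.toString
                  ++ PySem.Int.toStr ((PySem.Str.count astring char.toString : Nat) : Int)))
      (PySem.Set.empty, "")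
  r.2

-- ===== PRECONDITION & SPEC =====
def Spec_compresstodigit (astring : String) (out : String) : Prop := out = compresstodigit_alt astring
instance (astring : String) (out : String) : Decidable (Spec_compresstodigit astring out) := by unfold Spec_compresstodigit; infer_instance

-- ===== CLAIM (what is proved, stated in full; the proofs are below) =====
def Claim_equal_compresstodigit : Prop := ∀ (astring : String), Dom_compresstodigit astring → Spec_compresstodigit astring (compresstodigit astring)

-- ===== LEMMAS AND PROOFS =====

-- A's counting step is the standard insert/getD counter step.
theorem stepA_eq (d : PySem.Dict Char Int) (c : Char) :
    (if d.contains c then d.insert c (d.getD c 0 + 1) else d.insert c 1)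
      = d.insert c (d.getD c 0 + 1) := by
  by_cases h : d.contains c = true
  · simp [h]
  · have h' : d.contains c = false := by simpa using h
    have hg : d.get? c = none := by
      have hc := PySem.Dict.contains_eq_isSome_get? (d := d) (k := c)
      rw [h'] at hc
      exact Option.not_isSome_iff_eq_none.mp (by simp [← hc])
    simp [h', PySem.Dict.getD, hg]

def joinAll (xs : List String) : String := xs.foldr (· ++ ·) ""

-- fold emitting two appended pieces per element
theorem foldl_append2_eq_joinAll (f g : Char → String) :
    ∀ (l : List Char) (a : String),
      l.foldl (fun ns k => ns ++ f k ++ g k) a = a ++ joinAll (l.map (fun k => f k ++ g k)) := by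
  intro l
  induction l with
  | nil => intro a; simp [joinAll]
  | cons c t ih =>
      intro a
      simp only [List.foldl_cons, List.map_cons, joinAll, List.foldr_cons]
      rw [ih (a ++ f c ++ g c)]
      simp [joinAll, String.append_assoc]

-- first-seen new characters of l relative to an already-seen set s
def freshSeq (s : PySem.Set Char) : List Char → List Char
  | [] => []
  | c :: t => if PySem.Set.contains s c then freshSeq s t else c :: freshSeq (PySem.Set.add s c) t

theorem freshSeq_key : ∀ (l : List Char) (s : PySem.Set Char),
    s ++ freshSeq s l = l.foldl PySem.Set.add s := by
  intro l
  induction l with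
  | nil => intro s; simp [freshSeq]
  | cons c t ih =>
      intro s
      by_cases hm : c ∈ s
      · have ha : PySem.Set.add s c = s := by simp [PySem.Set.add, hm]
        simp only [freshSeq, List.foldl_cons, ha]
        simpa [hm] using ih s
      · have ha : PySem.Set.add s c = s ++ [c] := by simp [PySem.Set.add, hm]
        simp only [freshSeq, List.foldl_cons, ha]
        rw [← ih (s ++ [c])]
        simp [hm]

theorem freshSeq_empty (l : List Char) : freshSeq PySem.Set.empty l = PySem.Set.ofList l := by
  have := freshSeq_key l PySem.Set.empty
  simpa [PySem.Set.empty, PySem.Set.ofList_eq_foldl] using this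

-- B's loop characterised
theorem foldB_eq (f g : Char → String) :
    ∀ (l : List Char) (s : PySem.Set Char) (a : String),
      l.foldl
        (fun (p : PySem.Set Char × String) c =>
          if PySem.Set.contains p.1 c then p else (PySem.Set.add p.1 c, p.2 ++ f c ++ g c)) (s, a)
      = (l.foldl PySem.Set.add s, a ++ joinAll ((freshSeq s l).map (fun c => f c ++ g c))) := by
  intro l
  induction l with
  | nil => intro s a; simp [freshSeq, joinAll]
  | cons c t ih =>
      intro s a
      by_cases hm : c ∈ s
      · have ha : PySem.Set.add s c = s := by simp [PySem.Set.add, hm]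
        simp only [List.foldl_cons, freshSeq]
        simpa [hm, ha] using ih s a
      · simp only [List.foldl_cons, freshSeq]
        rw [show (if PySem.Set.contains s c = true then (s, a)
              else (PySem.Set.add s c, a ++ f c ++ g c)) = (PySem.Set.add s c, a ++ f c ++ g c) by
            simp [hm]]
        rw [ih (PySem.Set.add s c) (a ++ f c ++ g c)]
        simp [hm, joinAll, String.append_assoc]

-- Str.count with a single-character needle is List.count on toList
theorem count_go_singleton (c : Char) :
    ∀ (l : List Char) (fuel acc : Nat), l.length ≤ fuel →
      PySem.Chars.count.go [c] fuel l acc = acc + l.count c := by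
  intro l
  induction l with
  | nil =>
      intro fuel acc _
      cases fuel <;> simp [PySem.Chars.count.go]
  | cons h t ih =>
      intro fuel acc hf
      cases fuel with
      | zero => simp at hf
      | succ f =>
          have hf' : t.length ≤ f := by simpa using hf
          by_cases hc : c = h
          · subst hc
            have hpre : [c].isPrefixOf (c :: t) = true := by simp [List.isPrefixOf]
            simp only [PySem.Chars.count.go, hpre, if_true, List.length_cons,
              List.length_nil, Nat.zero_add, List.drop_succ_cons, List.drop_zero]
            rw [ih f (acc + 1) hf']
            simp
            omega
          · have hcs : ¬h = c := fun e => hc e.symm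
            have hpre : [c].isPrefixOf (h :: t) = false := by
              simp only [List.isPrefixOf, Bool.and_true, beq_eq_false_iff_ne, ne_eq]
              exact hc
            simp only [PySem.Chars.count.go, hpre, Bool.false_eq_true, if_false]
            rw [ih f acc hf']
            simp [hcs]

theorem count_singleton (l : List Char) (c : Char) :
    PySem.Chars.count l [c] = l.count c := by
  simp only [PySem.Chars.count]
  simpa using count_go_singleton c l l.length 0 le_rfl

-- ===== VERDICT (by name: the statement is the Claim_ definition above) =====
theorem compresstodigit_spec : Claim_equal_compresstodigit := by
  intro astring _
  unfold Spec_compresstodigit compresstodigit compresstodigit_alt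
  dsimp only
  have hstep :
      (fun (d : PySem.Dict Char Int) element =>
        if d.contains element then d.insert element (d.getD element 0 + 1)
        else d.insert element 1)
      = fun d element => d.insert element (d.getD element 0 + 1) := by
    funext d e; exact stepA_eq d e
  rw [hstep, PySem.Dict.foldl_insert_getD_add_one_eq_counter, PySem.Dict.keys_counter]
  rw [foldl_append2_eq_joinAll (fun e => e.toString)
        (fun e => PySem.Int.toStr ((PySem.Dict.counter astring.toList).getD e 0))]
  rw [foldB_eq (fun ch => ch.toString)
        (fun ch => PySem.Int.toStr ((PySem.Str.count astring ch.toString : Nat) : Int))]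
  simp only [freshSeq_empty]
  have hfun :
      (fun k => k.toString ++ PySem.Int.toStr ((PySem.Dict.counter astring.toList).getD k 0))
      = fun ch => ch.toString ++ PySem.Int.toStr ((PySem.Str.count astring ch.toString : Nat) : Int) := by
    funext k
    have h1 : (PySem.Dict.counter astring.toList).getD k 0 = (astring.toList.count k : Int) :=
      PySem.Dict.getD_counter astring.toList k
    have h2 : PySem.Str.count astring k.toString = astring.toList.count k := by
      rw [PySem.Str.count_eq]
      have : k.toString.toList = [k] := by simp
      rw [this, count_singleton]
    rw [h1, h2]
  rw [hfun]
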